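-- pv_equiv track=rewrite | github.com/Koweiyi/oi_problems | leetcode/daily/lc823.py | numFactoredBinaryTrees
-- ===== SOURCE A (Python) =====
-- from typing import List
--
-- mod = 10 ** 9 + 7
--
-- def numFactoredBinaryTrees(arr: List[int]) -> int:
--     arr.sort()
--     dp = [1] * len(arr)
--     for i in range(1,len(arr)):
--         l, r = 0, i - 1
--         while l < r:
--             if arr[l] * arr[r] == arr[i]:
--                 dp[i] = (dp[i] + 2 * dp[l] * dp[r]) % mod
--                 l += 1
--                 r -= 1
--             elif arr[l] * arr[r] > arr[i]:
--                 r -= 1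
--             else :
--                 l += 1
--         if arr[l] * arr[l] == arr[i]:
--             dp[i] = (dp[i] + dp[l] * dp[l]) % mod
--     return sum(dp) % mod
-- ===== SOURCE B (Python) =====
-- from typing import List
--
-- mod = 10 ** 9 + 7
--
-- def numFactoredBinaryTrees(arr: List[int]) -> int:
--     arr.sort()
--     n = len(arr)
--     idx = {v: i for i, v in enumerate(arr)}
--     dp = [0] * n
--     for i in range(n):
--         total = 1
--         for j in range(i):
--             if arr[i] % arr[j] == 0:
--                 k = idx.get(arr[i] // arr[j])
--                 if k is not None:
--                     total += dp[j] * dp[k]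
--         dp[i] = total % mod
--     return sum(dp) % mod
-- ===== Notes on version B (the rewrite author's own statement) =====
-- stated objective: idiomatic
-- what changed: Replaced the two-pointer factor-pair search with its separate 2*dp[l]*dp[r] double-count and square special case by a single divisor scan per element over a value-to-index dictionary that counts ordered factor pairs directly.
-- outside the precondition, e.g. on numFactoredBinaryTrees([2, 2, 4]): A returns 6, B returns 5; on numFactoredBinaryTrees([-5, 4, -1, -4, 1]): A returns 5, B returns 8; on numFactoredBinaryTrees([0, 3]): A returns 2, B raises ZeroDivisionError
import Mathlib
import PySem

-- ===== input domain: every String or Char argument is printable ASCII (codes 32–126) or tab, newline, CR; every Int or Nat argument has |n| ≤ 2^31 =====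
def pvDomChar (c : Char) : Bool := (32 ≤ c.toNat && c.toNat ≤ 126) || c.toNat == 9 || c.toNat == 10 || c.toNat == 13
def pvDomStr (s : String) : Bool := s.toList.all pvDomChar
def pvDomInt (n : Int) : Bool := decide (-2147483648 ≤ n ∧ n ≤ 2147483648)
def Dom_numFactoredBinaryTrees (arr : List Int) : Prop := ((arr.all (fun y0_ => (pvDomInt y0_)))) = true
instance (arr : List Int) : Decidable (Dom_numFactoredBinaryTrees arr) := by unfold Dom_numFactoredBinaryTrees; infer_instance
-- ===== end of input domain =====

-- B replaces A's two-pointer factor-pair search (plus its separate square case) by a per-element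
-- divisor scan over a value→index dictionary counting ordered factor pairs; objective: idiomatic.
-- Both A's and B's Python sort arr in place; the equivalence proved here is about the return value.


-- ===== PORT A =====
-- mod = 10 ** 9 + 7
def pvM : Int := 1000000007

-- arr[i] / dp[i]: every index either program reads is provably in range, so the default is never hit
def pvGet (xs : List Int) (i : Nat) : Int := xs.getD i 0

-- A's 'while l < r' two-pointer loop (state: l, r and dp[i] as di); returns (final dp[i], final l)
def pvAWhile (s dp : List Int) (t : Int) (l r : Nat) (di : Int) : Int × Nat :=
  if _h : l < r then
    if pvGet s l * pvGet s r = t then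
      pvAWhile s dp t (l + 1) (r - 1) (PySem.Int.mod (di + 2 * pvGet dp l * pvGet dp r) pvM)
    else if pvGet s l * pvGet s r > t then
      pvAWhile s dp t l (r - 1) di
    else
      pvAWhile s dp t (l + 1) r di
  else (di, l)
termination_by r - l
decreasing_by all_goals omega

-- one iteration of A's outer 'for i in range(1, len(arr))' loop
def pvAStep (s : List Int) (dp : List Int) (i : Nat) : List Int :=
  let res := pvAWhile s dp (pvGet s i) 0 (i - 1) (pvGet dp i)
  let di := if pvGet s res.2 * pvGet s res.2 = pvGet s i then
              PySem.Int.mod (res.1 + pvGet dp res.2 * pvGet dp res.2) pvM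
            else res.1
  dp.set i di

def numFactoredBinaryTrees (arr : List Int) : Int :=
  let s := PySem.List.sorted arr (fun x => x) false
  let dp := (List.range' 1 (s.length - 1)).foldl (fun dp i => pvAStep s dp i)
              (List.replicate s.length (1 : Int))
  PySem.Int.mod dp.sum pvM

-- ===== PORT B =====
-- idx = {v: i for i, v in enumerate(arr)}
def pvBuildIdx (s : List Int) : PySem.Dict Int Int :=
  (PySem.List.enumerate s 0).foldl (fun d p => PySem.Dict.insert d p.2 p.1) PySem.Dict.empty

-- one iteration of B's 'for i in range(n)' loop (the j-loop accumulates 'total');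
-- the dict's values are the indices 0..n-1, hence nonnegative: k.toNat is exact
def pvBStep (s : List Int) (idx : PySem.Dict Int Int) (dp : List Int) (i : Nat) : List Int :=
  let total := (List.range i).foldl (fun tot j =>
      if PySem.Int.mod (pvGet s i) (pvGet s j) = 0 then
        match PySem.Dict.get? idx (PySem.Int.floordiv (pvGet s i) (pvGet s j)) with
        | some k => tot + pvGet dp j * pvGet dp k.toNat
        | none => tot
      else tot) 1
  dp.set i (PySem.Int.mod total pvM)

def numFactoredBinaryTrees_alt (arr : List Int) : Int :=
  let s := PySem.List.sorted arr (fun x => x) false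
  let idx := pvBuildIdx s
  let dp := (List.range s.length).foldl (fun dp i => pvBStep s idx dp i)
              (List.replicate s.length (0 : Int))
  PySem.Int.mod dp.sum pvM

-- ===== PRECONDITION & SPEC =====
-- Pre_ admits the problem's stated input domain (LeetCode 823: distinct positive integers) and
-- every list with no multiplicative relation x * y ∈ arr (both programs then count nothing).
-- It excludes only lists that combine a relation with duplicates or non-positive values: there
-- the two-pointer's pair accounting is an accident of its scan order (and on lists containing 0,
-- which always satisfy 0 * 0 ∈ arr, B raises ZeroDivisionError where A returns).
def Pre_numFactoredBinaryTrees (arr : List Int) : Prop :=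
  (arr.Nodup ∧ ∀ x ∈ arr, 1 ≤ x) ∨ ¬ ∃ x ∈ arr, ∃ y ∈ arr, x * y ∈ arr
instance (arr : List Int) : Decidable (Pre_numFactoredBinaryTrees arr) := by
  unfold Pre_numFactoredBinaryTrees; infer_instance

def pvWitness_numFactoredBinaryTrees : List Int := [4, 2, 8]

def Spec_numFactoredBinaryTrees (arr : List Int) (out : Int) : Prop := out = numFactoredBinaryTrees_alt arr
instance (arr : List Int) (out : Int) : Decidable (Spec_numFactoredBinaryTrees arr out) := by unfold Spec_numFactoredBinaryTrees; infer_instance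

-- ===== CLAIM (what is proved, stated in full; the proofs are below) =====
def Claim_equal_numFactoredBinaryTrees : Prop := ∀ (arr : List Int), Dom_numFactoredBinaryTrees arr → Pre_numFactoredBinaryTrees arr → Spec_numFactoredBinaryTrees arr (numFactoredBinaryTrees arr)

-- ===== LEMMAS AND PROOFS =====
theorem pvGet_set (dp : List Int) (i : Nat) (hi : i < dp.length) (v : Int) (x : Nat) :
    pvGet (dp.set i v) x = if x = i then v else pvGet dp x := by
  simp only [pvGet, List.getD, List.getElem?_set]
  by_cases h : x = i
  · simp [h, hi]
  · simp [h, Ne.symm h]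

def pvP (s : List Int) (t : Int) (l r : Nat) : Finset (Nat × Nat) :=
  (Finset.Icc l r ×ˢ Finset.Icc l r).filter (fun p => p.1 < p.2 ∧ pvGet s p.1 * pvGet s p.2 = t)

theorem pvP_gt (s : List Int) (t : Int) (n l r : Nat)
    (hm : ∀ p q, p < q → q < n → pvGet s p < pvGet s q)
    (h2 : ∀ p, p < n → 1 ≤ pvGet s p)
    (hlr : l < r) (hrn : r < n) (hgt : pvGet s l * pvGet s r > t) :
    pvP s t l r = pvP s t l (r - 1) := by
  ext ⟨x, y⟩
  simp only [pvP, Finset.mem_filter, Finset.mem_product, Finset.mem_Icc]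
  constructor
  · rintro ⟨⟨⟨hlx, hxr⟩, ⟨hly, hyr⟩⟩, hxy, hft⟩
    have hyne : y ≠ r := by
      rintro rfl
      have hflx : pvGet s l ≤ pvGet s x := by
        rcases Nat.eq_or_lt_of_le hlx with h | h
        · rw [h]
        · exact le_of_lt (hm l x h (by omega))
      have hy2 : (1:Int) ≤ pvGet s y := h2 y (by omega)
      nlinarith
    exact ⟨⟨⟨hlx, by omega⟩, ⟨hly, by omega⟩⟩, hxy, hft⟩
  · rintro ⟨⟨⟨hlx, hxr⟩, ⟨hly, hyr⟩⟩, hxy, hft⟩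
    exact ⟨⟨⟨hlx, by omega⟩, ⟨hly, by omega⟩⟩, hxy, hft⟩

theorem pvP_lt (s : List Int) (t : Int) (n l r : Nat)
    (hm : ∀ p q, p < q → q < n → pvGet s p < pvGet s q)
    (h2 : ∀ p, p < n → 1 ≤ pvGet s p)
    (hlr : l < r) (hrn : r < n) (hlt : pvGet s l * pvGet s r < t) :
    pvP s t l r = pvP s t (l + 1) r := by
  ext ⟨x, y⟩
  simp only [pvP, Finset.mem_filter, Finset.mem_product, Finset.mem_Icc]
  constructor
  · rintro ⟨⟨⟨hlx, hxr⟩, ⟨hly, hyr⟩⟩, hxy, hft⟩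
    have hxne : x ≠ l := by
      rintro rfl
      have hfy : pvGet s y ≤ pvGet s r := by
        rcases Nat.eq_or_lt_of_le hyr with h | h
        · rw [h]
        · exact le_of_lt (hm y r h hrn)
      have hx2 : (1:Int) ≤ pvGet s x := h2 x (by omega)
      nlinarith
    exact ⟨⟨⟨by omega, hxr⟩, ⟨by omega, hyr⟩⟩, hxy, hft⟩
  · rintro ⟨⟨⟨hlx, hxr⟩, ⟨hly, hyr⟩⟩, hxy, hft⟩
    exact ⟨⟨⟨by omega, hxr⟩, ⟨by omega, hyr⟩⟩, hxy, hft⟩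

theorem pvP_eq (s : List Int) (t : Int) (n l r : Nat)
    (hm : ∀ p q, p < q → q < n → pvGet s p < pvGet s q)
    (h2 : ∀ p, p < n → 1 ≤ pvGet s p)
    (hlr : l < r) (hrn : r < n) (heq : pvGet s l * pvGet s r = t) :
    pvP s t l r = insert (l, r) (pvP s t (l + 1) (r - 1)) := by
  have hfl0 : pvGet s l ≠ 0 := by have := h2 l (by omega); omega
  have hfr0 : pvGet s r ≠ 0 := by have := h2 r (by omega); omega
  ext ⟨x, y⟩
  simp only [pvP, Finset.mem_filter, Finset.mem_product, Finset.mem_Icc, Finset.mem_insert,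
    Prod.mk.injEq]
  constructor
  · rintro ⟨⟨⟨hlx, hxr⟩, ⟨hly, hyr⟩⟩, hxy, hft⟩
    by_cases hxl : x = l
    · subst hxl
      have h' : pvGet s x * pvGet s y = pvGet s x * pvGet s r := hft.trans heq.symm
      have hfy : pvGet s y = pvGet s r := mul_left_cancel₀ hfl0 h'
      have hyrr : y = r := by
        by_contra hne
        have hylt : y < r := by omega
        have := hm y r hylt hrn
        omega
      exact Or.inl ⟨rfl, hyrr⟩
    · have hyner : y ≠ r := by
        rintro rfl
        have : pvGet s x = pvGet s l := mul_right_cancel₀ hfr0 (hft.trans heq.symm)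
        have hlltx : l < x := by omega
        have := hm l x hlltx (by omega)
        omega
      exact Or.inr ⟨⟨⟨by omega, by omega⟩, ⟨by omega, by omega⟩⟩, hxy, hft⟩
  · rintro (⟨rfl, rfl⟩ | ⟨⟨⟨hlx, hxr⟩, ⟨hly, hyr⟩⟩, hxy, hft⟩)
    · exact ⟨⟨⟨le_refl _, by omega⟩, ⟨by omega, le_refl _⟩⟩, hlr, heq⟩
    · exact ⟨⟨⟨by omega, by omega⟩, ⟨by omega, by omega⟩⟩, hxy, hft⟩

theorem pvP_self (s : List Int) (t : Int) (l : Nat) : pvP s t l l = ∅ := by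
  ext ⟨x, y⟩
  simp only [pvP, Finset.mem_filter, Finset.mem_product, Finset.mem_Icc, Finset.notMem_empty,
    iff_false]
  rintro ⟨⟨⟨h1, h2⟩, h3, h4⟩, h5, _⟩
  omega

theorem pvP_empty (s : List Int) (t : Int) (l r : Nat) (h : r < l) : pvP s t l r = ∅ := by
  ext ⟨x, y⟩
  simp only [pvP, Finset.mem_filter, Finset.mem_product, Finset.mem_Icc, Finset.notMem_empty,
    iff_false]
  rintro ⟨⟨⟨h1, h2⟩, h3, h4⟩, h5, _⟩
  omega

theorem pvP_not_mem (s : List Int) (t : Int) (l r : Nat) :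
    (l, r) ∉ pvP s t (l + 1) (r - 1) := by
  simp only [pvP, Finset.mem_filter, Finset.mem_product, Finset.mem_Icc]
  rintro ⟨⟨⟨h1, _⟩, _⟩, _⟩
  omega

def pvPairS (s dp : List Int) (t : Int) (l r : Nat) : Int :=
  ∑ p ∈ pvP s t l r, 2 * (pvGet dp p.1 * pvGet dp p.2)

theorem pvM_pos : (0 : Int) < pvM := by norm_num [pvM]

theorem pvAWhile_spec (s dp : List Int) (t : Int) (n : Nat)
    (hm : ∀ p q, p < q → q < n → pvGet s p < pvGet s q)
    (h2 : ∀ p, p < n → 1 ≤ pvGet s p) :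
    ∀ (fuel : Nat), ∀ (l r : Nat) (di : Int), r - l ≤ fuel → l ≤ r → r < n → 0 ≤ di → di < pvM →
      (pvAWhile s dp t l r di).1 = (di + pvPairS s dp t l r) % pvM ∧
      l ≤ (pvAWhile s dp t l r di).2 ∧ (pvAWhile s dp t l r di).2 ≤ r ∧
      (∀ x, l ≤ x → x ≤ r → pvGet s x * pvGet s x = t → x = (pvAWhile s dp t l r di).2) := by
  intro fuel
  induction fuel with
  | zero =>
    intro l r di hfuel hlr hrn hdi0 hdi1
    have hle : l = r := by omega
    subst hle
    rw [pvAWhile]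
    simp only [lt_irrefl, dite_false]
    refine ⟨?_, le_refl _, le_refl _, ?_⟩
    · rw [pvPairS, pvP_self]
      simp [Int.emod_eq_of_lt hdi0 hdi1]
    · intro x h1 h2' _; omega
  | succ fuel ih =>
    intro l r di hfuel hlr hrn hdi0 hdi1
    by_cases hlt : l < r
    · rw [pvAWhile]
      simp only [hlt, dite_true]
      by_cases he : pvGet s l * pvGet s r = t
      · simp only [he, if_true]
        have hmodpos := pvM_pos
        set di' := PySem.Int.mod (di + 2 * pvGet dp l * pvGet dp r) pvM with hdi'
        have hdi'em : di' = (di + 2 * pvGet dp l * pvGet dp r) % pvM :=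
          PySem.Int.mod_eq_emod_of_pos pvM_pos
        have hdi'0 : 0 ≤ di' := by rw [hdi'em]; exact Int.emod_nonneg _ (by norm_num [pvM])
        have hdi'1 : di' < pvM := by rw [hdi'em]; exact Int.emod_lt_of_pos _ pvM_pos
        have hP : pvP s t l r = insert (l, r) (pvP s t (l + 1) (r - 1)) :=
          pvP_eq s t n l r hm h2 hlt hrn he
        have hsum : pvPairS s dp t l r
            = 2 * (pvGet dp l * pvGet dp r) + pvPairS s dp t (l + 1) (r - 1) := by
          rw [pvPairS, hP, Finset.sum_insert (pvP_not_mem s t l r)]; rfl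
        by_cases hsub : l + 1 ≤ r - 1
        · obtain ⟨hv, hl1, hl2, hsq⟩ := ih (l + 1) (r - 1) di' (by omega) hsub (by omega) hdi'0 hdi'1
          refine ⟨?_, by omega, by omega, ?_⟩
          · rw [hv, hdi'em, Int.emod_add_emod, hsum]; ring_nf
          · intro x hx1 hx2 hxt
            rcases Nat.lt_or_ge x (l + 1) with h | h
            · exfalso
              have hxl : x = l := by omega
              subst hxl
              have hfl : pvGet s x < pvGet s r := hm x r hlt hrn
              have hfl2 : (1:Int) ≤ pvGet s x := h2 x (by omega)
              nlinarith
            · rcases Nat.lt_or_ge (r - 1) x with h' | h'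
              · exfalso
                have hxr : x = r := by omega
                subst hxr
                have hfl : pvGet s l < pvGet s x := hm l x hlt hrn
                have hfl2 : (1:Int) ≤ pvGet s l := h2 l (by omega)
                nlinarith
              · exact hsq x h h' hxt
        · -- r = l + 1 : the recursive call hits the base case immediately
          have hr : r = l + 1 := by omega
          rw [pvAWhile]
          simp only [show ¬ (l + 1 < r - 1) by omega, dite_false]
          refine ⟨?_, by omega, by omega, ?_⟩
          · have hPsub : pvPairS s dp t (l + 1) (r - 1) = 0 := by
              rw [pvPairS, pvP_empty s t (l + 1) (r - 1) (by omega)]; simp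
            rw [hdi'em, hsum, hPsub]; ring_nf
          · intro x hx1 hx2 hxt
            have : x = l ∨ x = r := by omega
            rcases this with rfl | rfl
            · exfalso
              have hfl : pvGet s x < pvGet s r := hm x r hlt hrn
              have hfl2 : (1:Int) ≤ pvGet s x := h2 x (by omega)
              nlinarith
            · omega
      · by_cases hg : pvGet s l * pvGet s r > t
        · simp only [he, hg, if_false, if_true]
          obtain ⟨hv, hl1, hl2, hsq⟩ := ih l (r - 1) di (by omega) (by omega) (by omega) hdi0 hdi1
          refine ⟨?_, by omega, by omega, ?_⟩
          · rw [hv]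
            simp only [pvPairS]
            rw [pvP_gt s t n l r hm h2 hlt hrn hg]
          · intro x hx1 hx2 hxt
            rcases Nat.lt_or_ge (r - 1) x with h' | h'
            · exfalso
              have hxr : x = r := by omega
              subst hxr
              have hfl : pvGet s l < pvGet s x := hm l x hlt hrn
              have hfl2 : (1:Int) ≤ pvGet s l := h2 l (by omega)
              nlinarith
            · exact hsq x hx1 h' hxt
        · have hl' : pvGet s l * pvGet s r < t := by omega
          simp only [he, hg, if_false]
          obtain ⟨hv, hl1, hl2, hsq⟩ := ih (l + 1) r di (by omega) (by omega) hrn hdi0 hdi1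
          refine ⟨?_, by omega, by omega, ?_⟩
          · rw [hv]
            simp only [pvPairS]
            rw [pvP_lt s t n l r hm h2 hlt hrn hl']
          · intro x hx1 hx2 hxt
            rcases Nat.lt_or_ge x (l + 1) with h | h
            · exfalso
              have hxl : x = l := by omega
              subst hxl
              have hfl : pvGet s x < pvGet s r := hm x r hlt hrn
              have hfl2 : (1:Int) ≤ pvGet s x := h2 x (by omega)
              nlinarith
            · exact hsq x h hx2 hxt
    · have hle : l = r := by omega
      subst hle
      rw [pvAWhile]
      simp only [lt_irrefl, dite_false]
      refine ⟨?_, le_refl _, le_refl _, ?_⟩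
      · rw [pvPairS, pvP_self]
        simp [Int.emod_eq_of_lt hdi0 hdi1]
      · intro x h1 h2' _; omega

def pvC (s dp : List Int) (i : Nat) : Int :=
  ∑ j ∈ Finset.range i, ∑ k ∈ Finset.range i,
    if pvGet s j * pvGet s k = pvGet s i then pvGet dp j * pvGet dp k else 0

def pvSqS (s dp : List Int) (t : Int) (l r : Nat) : Int :=
  ∑ x ∈ Finset.Icc l r, if pvGet s x * pvGet s x = t then pvGet dp x * pvGet dp x else 0

theorem pvC_split (s dp : List Int) (i : Nat) (hi : 1 ≤ i) :
    pvC s dp i = pvPairS s dp (pvGet s i) 0 (i - 1) + pvSqS s dp (pvGet s i) 0 (i - 1) := by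
  have hIcc : Finset.Icc 0 (i - 1) = Finset.range i := by
    ext x; simp only [Finset.mem_Icc, Finset.mem_range]; omega
  set t := pvGet s i with ht
  clear_value t
  -- pointwise trichotomy split
  have key : ∀ x y : Nat,
      (if pvGet s x * pvGet s y = t then pvGet dp x * pvGet dp y else 0)
      = (if x < y ∧ pvGet s x * pvGet s y = t then pvGet dp x * pvGet dp y else 0)
      + (if y < x ∧ pvGet s x * pvGet s y = t then pvGet dp x * pvGet dp y else 0)
      + (if x = y ∧ pvGet s x * pvGet s y = t then pvGet dp x * pvGet dp y else 0) := by
    intro x y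
    rcases lt_trichotomy x y with h | h | h
    · simp [h, show ¬ y < x by omega, show ¬ x = y by omega]
    · simp [h]
    · simp [h, show ¬ x < y by omega, show x ≠ y by omega]
  have hC : pvC s dp i
      = (∑ x ∈ Finset.range i, ∑ y ∈ Finset.range i,
          if x < y ∧ pvGet s x * pvGet s y = t then pvGet dp x * pvGet dp y else 0)
      + (∑ x ∈ Finset.range i, ∑ y ∈ Finset.range i,
          if y < x ∧ pvGet s x * pvGet s y = t then pvGet dp x * pvGet dp y else 0)
      + (∑ x ∈ Finset.range i, ∑ y ∈ Finset.range i,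
          if x = y ∧ pvGet s x * pvGet s y = t then pvGet dp x * pvGet dp y else 0) := by
    rw [pvC]
    simp only [← ht]
    simp only [key, Finset.sum_add_distrib]
  -- the '>' sum equals the '<' sum
  have hswap : (∑ x ∈ Finset.range i, ∑ y ∈ Finset.range i,
          if y < x ∧ pvGet s x * pvGet s y = t then pvGet dp x * pvGet dp y else 0)
      = (∑ x ∈ Finset.range i, ∑ y ∈ Finset.range i,
          if x < y ∧ pvGet s x * pvGet s y = t then pvGet dp x * pvGet dp y else 0) := by
    rw [Finset.sum_comm]
    refine Finset.sum_congr rfl (fun x _ => Finset.sum_congr rfl (fun y _ => ?_))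
    rw [mul_comm (pvGet s y) (pvGet s x), mul_comm (pvGet dp y) (pvGet dp x)]
  -- the '<' sums pair up into pvPairS
  have hpair : pvPairS s dp t 0 (i - 1)
      = (∑ x ∈ Finset.range i, ∑ y ∈ Finset.range i,
          if x < y ∧ pvGet s x * pvGet s y = t then pvGet dp x * pvGet dp y else 0)
      + (∑ x ∈ Finset.range i, ∑ y ∈ Finset.range i,
          if x < y ∧ pvGet s x * pvGet s y = t then pvGet dp x * pvGet dp y else 0) := by
    rw [pvPairS, pvP, hIcc, Finset.sum_filter, Finset.sum_product]
    rw [← Finset.sum_add_distrib]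
    refine Finset.sum_congr rfl (fun x _ => ?_)
    rw [← Finset.sum_add_distrib]
    refine Finset.sum_congr rfl (fun y _ => ?_)
    by_cases h : x < y ∧ pvGet s x * pvGet s y = t
    · simp [h]; ring
    · simp [h]
  -- the diagonal sum is pvSqS
  have hdiag : (∑ x ∈ Finset.range i, ∑ y ∈ Finset.range i,
          if x = y ∧ pvGet s x * pvGet s y = t then pvGet dp x * pvGet dp y else 0)
      = pvSqS s dp t 0 (i - 1) := by
    rw [pvSqS, hIcc]
    refine Finset.sum_congr rfl (fun x hx => ?_)
    rw [Finset.sum_eq_single_of_mem x hx]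
    · simp
    · intro b _ hb
      exact if_neg (by rintro ⟨rfl, -⟩; exact hb rfl)
  rw [hC, hswap, hdiag, hpair]

theorem get?_pvBuildIdx_aux (v : Int) :
    ∀ (s : List Int) (a : Int) (d : PySem.Dict Int Int), s.Nodup →
      PySem.Dict.get? ((PySem.List.enumerate s a).foldl
          (fun d p => PySem.Dict.insert d p.2 p.1) d) v
      = (match PySem.List.index? s v with
         | some m => some (a + m)
         | none => PySem.Dict.get? d v) := by
  intro s
  induction s with
  | nil => intro a d _; simp [PySem.List.enumerate_nil, PySem.List.index?_eq_idxOf?]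
  | cons x xs ih =>
    intro a d hnd
    rw [PySem.List.enumerate_cons, List.foldl_cons]
    rw [ih (a + 1) (PySem.Dict.insert d x a) (List.nodup_cons.mp hnd).2]
    by_cases hvx : v = x
    · subst hvx
      have hvn : v ∉ xs := (List.nodup_cons.mp hnd).1
      rw [show PySem.List.index? xs v = none from (PySem.List.index?_eq_none_iff _ _).mpr hvn]
      rw [PySem.List.index?_cons_self]
      simp [PySem.Dict.get?_insert_self]
    · rw [PySem.List.index?_cons_of_ne _ (fun h => hvx h.symm)]
      cases hix : PySem.List.index? xs v with
      | some m => simp; ring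
      | none => simp [PySem.Dict.get?_insert_of_ne _ _ hvx]

theorem get?_pvBuildIdx (s : List Int) (hnd : s.Nodup) (v : Int) :
    PySem.Dict.get? (pvBuildIdx s) v = (PySem.List.index? s v).map (fun m => (m : Int)) := by
  rw [pvBuildIdx, get?_pvBuildIdx_aux v s 0 PySem.Dict.empty hnd]
  cases hix : PySem.List.index? s v with
  | some m => simp
  | none => simp [PySem.Dict.get?, PySem.Dict.empty]

theorem pvSum_map_range (f : Nat → Int) (n : Nat) :
    ((List.range n).map f).sum = ∑ j ∈ Finset.range n, f j := by
  induction n with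
  | zero => simp
  | succ n ih => rw [List.range_succ, Finset.sum_range_succ, List.map_append, List.sum_append, ih]; simp

theorem pvGet_eq_getElem (s : List Int) (k : Nat) (h : k < s.length) : pvGet s k = s[k] := by
  simp [pvGet, List.getD, List.getElem?_eq_getElem h]

theorem pvGet_mem (s : List Int) (k : Nat) (h : k < s.length) : pvGet s k ∈ s := by
  rw [pvGet_eq_getElem s k h]; exact List.getElem_mem h

theorem pvBStep_total (s dp : List Int) (i : Nat) (hnd : s.Nodup)
    (hm : ∀ p q, p < q → q < s.length → pvGet s p < pvGet s q)
    (h2 : ∀ p, p < s.length → 1 ≤ pvGet s p) (hin : i < s.length)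
    (hdpi0 : pvGet dp i = 0) :
    ((List.range i).foldl (fun tot j =>
      if PySem.Int.mod (pvGet s i) (pvGet s j) = 0 then
        match PySem.Dict.get? (pvBuildIdx s) (PySem.Int.floordiv (pvGet s i) (pvGet s j)) with
        | some k => tot + pvGet dp j * pvGet dp k.toNat
        | none => tot
      else tot) 1) = 1 + pvC s dp i := by
  have hbody : (fun (tot : Int) (j : Nat) =>
      if PySem.Int.mod (pvGet s i) (pvGet s j) = 0 then
        match PySem.Dict.get? (pvBuildIdx s) (PySem.Int.floordiv (pvGet s i) (pvGet s j)) with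
        | some k => tot + pvGet dp j * pvGet dp k.toNat
        | none => tot
      else tot)
      = (fun tot j => tot +
          (if PySem.Int.mod (pvGet s i) (pvGet s j) = 0 then
            match PySem.Dict.get? (pvBuildIdx s) (PySem.Int.floordiv (pvGet s i) (pvGet s j)) with
            | some k => pvGet dp j * pvGet dp k.toNat
            | none => 0
          else 0)) := by
    funext tot j
    by_cases hc : PySem.Int.mod (pvGet s i) (pvGet s j) = 0
    · simp only [hc, if_true]
      cases PySem.Dict.get? (pvBuildIdx s) (PySem.Int.floordiv (pvGet s i) (pvGet s j)) <;> simp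
    · simp [hc]
  rw [hbody, PySem.List.foldl_add, pvSum_map_range, pvC]
  congr 1
  refine Finset.sum_congr rfl (fun j hj => ?_)
  have hji : j < i := Finset.mem_range.mp hj
  have hjn : j < s.length := by omega
  have hj2 : (1 : Int) ≤ pvGet s j := h2 j hjn
  have hi2 : (1 : Int) ≤ pvGet s i := h2 i hin
  by_cases hdvd : PySem.Int.mod (pvGet s i) (pvGet s j) = 0
  · have hdvd' : pvGet s j ∣ pvGet s i := (PySem.Int.mod_eq_zero_iff_dvd _ _).mp hdvd
    obtain ⟨c, hc⟩ := hdvd'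
    have hq : PySem.Int.floordiv (pvGet s i) (pvGet s j) = c := by
      rw [PySem.Int.floordiv_eq_ediv_of_pos (by omega), hc,
        Int.mul_ediv_cancel_left _ (by omega : pvGet s j ≠ 0)]
    rw [hdvd, if_pos rfl, hq, get?_pvBuildIdx s hnd c]
    cases hix : PySem.List.index? s c with
    | some m =>
      obtain ⟨hmlen, hsm, -⟩ := PySem.List.getElem_of_index?_eq_some hix
      have hfm : pvGet s m = c := by rw [pvGet_eq_getElem s m hmlen, hsm]
      have hc2 : (1 : Int) ≤ c := by rw [← hfm]; exact h2 m hmlen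
      by_cases hj1 : pvGet s j = 1
      · -- arr[j] = 1: the quotient is arr[i] itself, whose dp entry is still 0 in B
        have hct : c = pvGet s i := by rw [hc, hj1]; ring
        have hmi : m = i := by
          rcases Nat.lt_trichotomy m i with h | h | h
          · exfalso; have := hm m i h hin; omega
          · exact h
          · exfalso; have := hm i m h hmlen; omega
        have hrhs : (∑ k ∈ Finset.range i,
            if pvGet s j * pvGet s k = pvGet s i then pvGet dp j * pvGet dp k else 0) = 0 := by
          refine Finset.sum_eq_zero (fun k hk => ?_)
          refine if_neg (fun hbad => ?_)
          have hki : k < i := Finset.mem_range.mp hk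
          have := hm k i hki hin
          rw [hj1, one_mul] at hbad
          omega
        rw [hrhs]
        simp [hmi, hdpi0]
      · have hj2' : (2 : Int) ≤ pvGet s j := by omega
        have hmi : m < i := by
          by_contra hge
          rcases Nat.eq_or_lt_of_le (Nat.le_of_not_lt hge) with h | h
          · subst h; nlinarith [hfm, hc]
          · have := hm i m h hmlen; nlinarith
        have hz : ∀ b ∈ Finset.range i, b ≠ m →
            (if pvGet s j * pvGet s b = pvGet s i then pvGet dp j * pvGet dp b else 0) = 0 := by
          intro b hb hbm
          have hbn : b < s.length := by have := Finset.mem_range.mp hb; omega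
          refine if_neg (fun hbad => hbm ?_)
          have hfb : pvGet s b = c := by
            have h' : pvGet s j * pvGet s b = pvGet s j * c := by rw [hbad, hc]
            exact mul_left_cancel₀ (by omega : pvGet s j ≠ 0) h'
          by_contra hne
          rcases Nat.lt_or_ge b m with h | h
          · have := hm b m h hmlen; omega
          · have := hm m b (by omega) hbn; omega
        rw [Finset.sum_eq_single_of_mem m (Finset.mem_range.mpr hmi) hz,
          if_pos (by rw [hfm, ← hc])]
        rfl
    | none =>
      have hcn : c ∉ s := (PySem.List.index?_eq_none_iff _ _).mp hix
      show (0 : Int) = _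
      symm
      refine Finset.sum_eq_zero (fun k hk => ?_)
      have hkn : k < s.length := by have := Finset.mem_range.mp hk; omega
      refine if_neg (fun hbad => hcn ?_)
      have hfk : pvGet s k = c := by
        have h' : pvGet s j * pvGet s k = pvGet s j * c := by rw [hbad, hc]
        exact mul_left_cancel₀ (by omega : pvGet s j ≠ 0) h'
      rw [← hfk]
      exact pvGet_mem s k hkn
  · rw [if_neg hdvd]
    symm
    refine Finset.sum_eq_zero (fun k hk => ?_)
    refine if_neg (fun hbad => hdvd ?_)
    exact (PySem.Int.mod_eq_zero_iff_dvd _ _).mpr ⟨pvGet s k, hbad.symm⟩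

def pvG (s : List Int) : Nat → List Int
  | 0 => []
  | m + 1 => pvG s m ++ [(1 + pvC s (pvG s m) m) % pvM]

theorem pvG_length (s : List Int) (m : Nat) : (pvG s m).length = m := by
  induction m with
  | zero => rfl
  | succ m ih => simp [pvG, ih]

theorem pvGet_pvG_stable (s : List Int) {m m' : Nat} (h : m ≤ m') (j : Nat) (hj : j < m) :
    pvGet (pvG s m') j = pvGet (pvG s m) j := by
  induction m' with
  | zero => omega
  | succ m' ih =>
    rcases Nat.eq_or_lt_of_le h with h1 | h1
    · rw [h1]
    · have h2 : m ≤ m' := by omega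
      rw [← ih h2]
      show (pvG s m' ++ _).getD j 0 = (pvG s m').getD j 0
      exact List.getD_append _ _ _ _ (by rw [pvG_length]; omega)

theorem pvC_congr (s dp dp' : List Int) (i : Nat)
    (h : ∀ j, j < i → pvGet dp j = pvGet dp' j) :
    pvC s dp i = pvC s dp' i := by
  refine Finset.sum_congr rfl (fun j hj => Finset.sum_congr rfl (fun k hk => ?_))
  rw [h j (Finset.mem_range.mp hj), h k (Finset.mem_range.mp hk)]

theorem pvG_get (s : List Int) (m n : Nat) (h : m < n) :
    pvGet (pvG s n) m = (1 + pvC s (pvG s n) m) % pvM := by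
  rw [pvGet_pvG_stable s (show m + 1 ≤ n by omega) m (by omega)]
  have hlen : (pvG s m).length = m := pvG_length s m
  show (pvG s m ++ [(1 + pvC s (pvG s m) m) % pvM]).getD m 0 = _
  have hx := List.getElem?_concat_length (l := pvG s m) (a := (1 + pvC s (pvG s m) m) % pvM)
  rw [hlen] at hx
  rw [List.getD, hx, Option.getD_some]
  congr 1
  rw [pvC_congr s (pvG s m) (pvG s n) m
    (fun j hj => (pvGet_pvG_stable s (show m ≤ n by omega) j hj).symm)]

theorem foldA_length (s : List Int) (l : List Nat) (dp : List Int) :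
    (l.foldl (fun dp i => pvAStep s dp i) dp).length = dp.length := by
  induction l generalizing dp with
  | nil => rfl
  | cons x xs ih => simp only [List.foldl_cons]; rw [ih]; simp [pvAStep]

theorem foldB_length (s : List Int) (idx : PySem.Dict Int Int) (l : List Nat) (dp : List Int) :
    (l.foldl (fun dp i => pvBStep s idx dp i) dp).length = dp.length := by
  induction l generalizing dp with
  | nil => rfl
  | cons x xs ih => simp only [List.foldl_cons]; rw [ih]; simp [pvBStep]

-- A's per-iteration value equals the canonical dp value

theorem pvAStep_value (s dp : List Int) (i : Nat)
    (hm : ∀ p q, p < q → q < s.length → pvGet s p < pvGet s q)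
    (h2 : ∀ p, p < s.length → 1 ≤ pvGet s p)
    (hi1 : 1 ≤ i) (hin : i < s.length) (hdpi : pvGet dp i = 1) :
    (if pvGet s (pvAWhile s dp (pvGet s i) 0 (i - 1) (pvGet dp i)).2 *
          pvGet s (pvAWhile s dp (pvGet s i) 0 (i - 1) (pvGet dp i)).2 = pvGet s i then
       PySem.Int.mod ((pvAWhile s dp (pvGet s i) 0 (i - 1) (pvGet dp i)).1 +
         pvGet dp (pvAWhile s dp (pvGet s i) 0 (i - 1) (pvGet dp i)).2 *
           pvGet dp (pvAWhile s dp (pvGet s i) 0 (i - 1) (pvGet dp i)).2) pvM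
     else (pvAWhile s dp (pvGet s i) 0 (i - 1) (pvGet dp i)).1) = (1 + pvC s dp i) % pvM := by
  obtain ⟨hv, hl1, hl2, hsq⟩ :=
    pvAWhile_spec s dp (pvGet s i) s.length hm h2 (i - 1) 0 (i - 1) (pvGet dp i)
      (by omega) (by omega) (by omega) (by rw [hdpi]; norm_num) (by rw [hdpi]; norm_num [pvM])
  set res := pvAWhile s dp (pvGet s i) 0 (i - 1) (pvGet dp i) with hres
  rw [pvC_split s dp i hi1]
  by_cases hsql : pvGet s res.2 * pvGet s res.2 = pvGet s i
  · simp only [hsql, if_true]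
    have hsqS : pvSqS s dp (pvGet s i) 0 (i - 1) = pvGet dp res.2 * pvGet dp res.2 := by
      rw [pvSqS]
      rw [Finset.sum_eq_single_of_mem res.2 (by simp [Finset.mem_Icc]; omega)
        (fun b hb hbm => if_neg (fun hbad => hbm (hsq b (by simp [Finset.mem_Icc] at hb; omega)
          (by simp [Finset.mem_Icc] at hb; omega) hbad)))]
      rw [if_pos hsql]
    rw [PySem.Int.mod_eq_emod_of_pos pvM_pos, hv, hdpi, Int.emod_add_emod, hsqS]
    ring_nf
  · simp only [hsql, if_false]
    have hsqS : pvSqS s dp (pvGet s i) 0 (i - 1) = 0 := by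
      rw [pvSqS]
      refine Finset.sum_eq_zero (fun b hb => ?_)
      refine if_neg (fun hbad => hsql ?_)
      have := hsq b (by simp [Finset.mem_Icc] at hb; omega)
        (by simp [Finset.mem_Icc] at hb; omega) hbad
      rwa [this] at hbad
    rw [hv, hdpi, hsqS]
    ring_nf

theorem pvGet_replicate (n j : Nat) (v : Int) : pvGet (List.replicate n v) j = if j < n then v else 0 := by
  by_cases h : j < n
  · simp [pvGet, List.getD, h]
  · simp [pvGet, List.getD, h]

theorem pvG_zero_val (s : List Int) (n : Nat) (h : 0 < n) : pvGet (pvG s n) 0 = 1 := by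
  rw [pvG_get s 0 n h]
  have : pvC s (pvG s n) 0 = 0 := by simp [pvC]
  rw [this]
  norm_num [pvM]

theorem foldA_spec (s : List Int)
    (hm : ∀ p q, p < q → q < s.length → pvGet s p < pvGet s q)
    (h2 : ∀ p, p < s.length → 1 ≤ pvGet s p) :
    ∀ k, (k = 0 ∨ k < s.length) → ∀ j, j < s.length →
      pvGet ((List.range' 1 k).foldl (fun dp i => pvAStep s dp i)
        (List.replicate s.length (1 : Int))) j
      = if j ≤ k then pvGet (pvG s s.length) j else 1 := by
  intro k
  induction k with
  | zero =>
    intro _ j hj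
    simp only [List.range'_zero, List.foldl_nil]
    rw [pvGet_replicate s.length j 1, if_pos hj]
    by_cases hj0 : j ≤ 0
    · rw [if_pos hj0]
      have : j = 0 := by omega
      subst this
      exact (pvG_zero_val s s.length (by omega)).symm
    · rw [if_neg hj0]
  | succ k ih =>
    intro hk j hj
    have hkn : k + 1 < s.length := by omega
    have hik : k < s.length ∨ k = 0 := by omega
    rw [List.range'_1_concat, List.foldl_append, List.foldl_cons, List.foldl_nil]
    set dpk := (List.range' 1 k).foldl (fun dp i => pvAStep s dp i)
      (List.replicate s.length (1 : Int)) with hdpk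
    have hlen : dpk.length = s.length := by
      rw [hdpk, foldA_length]; simp
    have ihk : ∀ j, j < s.length → pvGet dpk j = if j ≤ k then pvGet (pvG s s.length) j else 1 :=
      ih (by omega)
    show pvGet (pvAStep s dpk (1 + k)) j = _
    have h1k : (1 + k : Nat) = k + 1 := by omega
    simp only [pvAStep, h1k]
    rw [pvGet_set dpk (k + 1) (by omega) _ j]
    have hval := pvAStep_value s dpk (k + 1) hm h2 (by omega) hkn
      (by rw [ihk (k + 1) hkn, if_neg (by omega)])
    by_cases hjk : j = k + 1
    · subst hjk
      rw [if_pos rfl, if_pos (le_refl _), hval, pvG_get s (k + 1) s.length hkn]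
      rw [pvC_congr s dpk (pvG s s.length) (k + 1)
        (fun j' hj' => by rw [ihk j' (by omega), if_pos (by omega)])]
    · rw [if_neg hjk, ihk j hj]
      by_cases hle : j ≤ k
      · rw [if_pos hle, if_pos (by omega)]
      · rw [if_neg hle, if_neg (by omega)]

theorem foldB_spec (s : List Int) (hnd : s.Nodup)
    (hm : ∀ p q, p < q → q < s.length → pvGet s p < pvGet s q)
    (h2 : ∀ p, p < s.length → 1 ≤ pvGet s p) :
    ∀ k, k ≤ s.length → ∀ j, j < s.length →
      pvGet ((List.range k).foldl (fun dp i => pvBStep s (pvBuildIdx s) dp i)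
        (List.replicate s.length (0 : Int))) j
      = if j < k then pvGet (pvG s s.length) j else 0 := by
  intro k
  induction k with
  | zero =>
    intro _ j hj
    simp only [List.range_zero, List.foldl_nil]
    rw [pvGet_replicate s.length j 0, if_pos hj, if_neg (by omega)]
  | succ k ih =>
    intro hk j hj
    have hkn : k < s.length := by omega
    rw [List.range_succ, List.foldl_append, List.foldl_cons, List.foldl_nil]
    set dpk := (List.range k).foldl (fun dp i => pvBStep s (pvBuildIdx s) dp i)
      (List.replicate s.length (0 : Int)) with hdpk
    have hlen : dpk.length = s.length := by
      rw [hdpk, foldB_length]; simp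
    have ihk : ∀ j, j < s.length → pvGet dpk j = if j < k then pvGet (pvG s s.length) j else 0 :=
      ih (by omega)
    simp only [pvBStep]
    rw [pvGet_set dpk k (by omega) _ j]
    by_cases hjk : j = k
    · subst hjk
      rw [if_pos rfl, if_pos (by omega)]
      rw [pvBStep_total s dpk j hnd hm h2 hkn (by rw [ihk j hkn, if_neg (by omega)])]
      rw [PySem.Int.mod_eq_emod_of_pos pvM_pos, pvG_get s j s.length hkn]
      rw [pvC_congr s dpk (pvG s s.length) j
        (fun j' hj' => by rw [ihk j' (by omega), if_pos (by omega)])]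
    · rw [if_neg hjk, ihk j hj]
      by_cases hle : j < k
      · rw [if_pos hle, if_pos (by omega)]
      · rw [if_neg hle, if_neg (by omega)]

theorem numFactoredBinaryTrees_eq_alt (arr : List Int) (h1 : arr.Nodup) (hge : ∀ x ∈ arr, 1 ≤ x) :
    numFactoredBinaryTrees arr = numFactoredBinaryTrees_alt arr := by
  simp only [numFactoredBinaryTrees, numFactoredBinaryTrees_alt]
  set s := PySem.List.sorted arr (fun x => x) false with hs
  have hperm : s.Perm arr := PySem.List.sorted_perm arr (fun x => x) false
  have hnd : s.Nodup := hperm.nodup_iff.mpr h1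
  have hmem : ∀ x ∈ s, 1 ≤ x := fun x hx => hge x (hperm.mem_iff.mp hx)
  have hpairle : s.Pairwise (fun a b => a ≤ b) :=
    PySem.List.sorted_pairwise arr (fun x => x)
  have hpairlt : s.Pairwise (fun a b => a < b) :=
    (hpairle.and hnd).imp (fun h => lt_of_le_of_ne h.1 h.2)
  have hm : ∀ p q, p < q → q < s.length → pvGet s p < pvGet s q := by
    intro p q hpq hq
    rw [pvGet_eq_getElem s p (by omega), pvGet_eq_getElem s q hq]
    exact List.pairwise_iff_getElem.mp hpairlt p q (by omega) hq hpq
  have h2 : ∀ p, p < s.length → 1 ≤ pvGet s p := fun p hp => hmem _ (pvGet_mem s p hp)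
  have hEq : (List.range' 1 (s.length - 1)).foldl (fun dp i => pvAStep s dp i)
        (List.replicate s.length (1 : Int))
      = (List.range s.length).foldl (fun dp i => pvBStep s (pvBuildIdx s) dp i)
        (List.replicate s.length (0 : Int)) := by
    apply List.ext_getElem
    · rw [foldA_length, foldB_length]
      simp
    · intro i hA hB
      have hin : i < s.length := by
        rw [foldA_length] at hA; simpa using hA
      have hAv := foldA_spec s hm h2 (s.length - 1) (by omega) i hin
      have hBv := foldB_spec s hnd hm h2 s.length (le_refl _) i hin
      rw [if_pos (by omega)] at hAv
      rw [if_pos hin] at hBv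
      calc _ = pvGet ((List.range' 1 (s.length - 1)).foldl (fun dp i => pvAStep s dp i)
                (List.replicate s.length (1 : Int))) i := by
              rw [pvGet_eq_getElem _ _ hA]
        _ = pvGet ((List.range s.length).foldl (fun dp i => pvBStep s (pvBuildIdx s) dp i)
                (List.replicate s.length (0 : Int))) i := by rw [hAv, hBv]
        _ = _ := by rw [pvGet_eq_getElem _ _ hB]
  rw [hEq]

theorem pvAWhile_norel (s dp : List Int) (t : Int) (ht : t ∈ s)
    (hnr : ∀ x ∈ s, ∀ y ∈ s, x * y ∉ s) :
    ∀ (fuel l r : Nat) (di : Int), r - l ≤ fuel → l ≤ r → r < s.length →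
      (pvAWhile s dp t l r di).1 = di ∧ (pvAWhile s dp t l r di).2 ≤ r := by
  intro fuel
  induction fuel with
  | zero =>
    intro l r di h1 h2 h3
    have hle : l = r := by omega
    subst hle
    rw [pvAWhile]
    simp
  | succ fuel ih =>
    intro l r di h1 h2 h3
    by_cases hlt : l < r
    · rw [pvAWhile]
      simp only [hlt, dite_true]
      have hne : ¬ (pvGet s l * pvGet s r = t) := fun he =>
        hnr _ (pvGet_mem s l (by omega)) _ (pvGet_mem s r h3) (he ▸ ht)
      rw [if_neg hne]
      by_cases hg : pvGet s l * pvGet s r > t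
      · simp only [hg, if_true]
        have h := ih l (r - 1) di (by omega) (by omega) (by omega)
        exact ⟨h.1, by omega⟩
      · simp only [hg, if_false]
        exact ih (l + 1) r di (by omega) (by omega) h3
    · have hle : l = r := by omega
      subst hle
      rw [pvAWhile]
      simp

theorem pvSet_replicate (n i : Nat) (v : Int) :
    (List.replicate n v).set i v = List.replicate n v := by
  apply List.ext_getElem
  · simp
  · intro j h1 h2
    simp

theorem pvAStep_norel (s : List Int) (hnr : ∀ x ∈ s, ∀ y ∈ s, x * y ∉ s)
    (i : Nat) (hi1 : 1 ≤ i) (hin : i < s.length) :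
    pvAStep s (List.replicate s.length (1 : Int)) i = List.replicate s.length (1 : Int) := by
  have hdpi : pvGet (List.replicate s.length (1 : Int)) i = 1 := by
    rw [pvGet_replicate, if_pos hin]
  have hw := pvAWhile_norel s (List.replicate s.length (1 : Int)) (pvGet s i)
    (pvGet_mem s i hin) hnr (i - 1) 0 (i - 1) 1 (by omega) (by omega) (by omega)
  have hsq : ¬ (pvGet s (pvAWhile s (List.replicate s.length (1 : Int)) (pvGet s i) 0 (i - 1) 1).2 *
      pvGet s (pvAWhile s (List.replicate s.length (1 : Int)) (pvGet s i) 0 (i - 1) 1).2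
        = pvGet s i) := fun he =>
    hnr _ (pvGet_mem s _ (by omega)) _ (pvGet_mem s _ (by omega)) (he ▸ pvGet_mem s i hin)
  rw [pvAStep]
  simp only [hdpi]
  rw [if_neg hsq, hw.1]
  exact pvSet_replicate _ _ _

theorem foldA_norel (s : List Int) (hnr : ∀ x ∈ s, ∀ y ∈ s, x * y ∉ s) :
    ∀ k, k < s.length ∨ k = 0 →
      (List.range' 1 k).foldl (fun dp i => pvAStep s dp i)
        (List.replicate s.length (1 : Int)) = List.replicate s.length (1 : Int) := by
  intro k
  induction k with
  | zero => intro _; rfl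
  | succ k ih =>
    intro hk
    rw [List.range'_1_concat, List.foldl_append, List.foldl_cons, List.foldl_nil,
      ih (by omega)]
    exact pvAStep_norel s hnr (1 + k) (by omega) (by omega)

theorem get?_pvBuildIdx_mem (v k : Int) :
    ∀ (s : List Int) (a : Int) (d : PySem.Dict Int Int),
      PySem.Dict.get? ((PySem.List.enumerate s a).foldl
          (fun d p => PySem.Dict.insert d p.2 p.1) d) v = some k →
      v ∈ s ∨ PySem.Dict.get? d v = some k := by
  intro s
  induction s with
  | nil => intro a d h; exact Or.inr (by simpa [PySem.List.enumerate_nil] using h)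
  | cons x xs ih =>
    intro a d h
    rw [PySem.List.enumerate_cons, List.foldl_cons] at h
    rcases ih (a + 1) (PySem.Dict.insert d x a) h with hv | hd
    · exact Or.inl (List.mem_cons_of_mem x hv)
    · by_cases hvx : v = x
      · exact Or.inl (hvx ▸ List.mem_cons_self)
      · rw [PySem.Dict.get?_insert_of_ne _ _ hvx] at hd
        exact Or.inr hd

theorem pvBStep_norel (s dp : List Int) (hnr : ∀ x ∈ s, ∀ y ∈ s, x * y ∉ s)
    (i : Nat) (hin : i < s.length) :
    ((List.range i).foldl (fun tot j =>
      if PySem.Int.mod (pvGet s i) (pvGet s j) = 0 then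
        match PySem.Dict.get? (pvBuildIdx s) (PySem.Int.floordiv (pvGet s i) (pvGet s j)) with
        | some k => tot + pvGet dp j * pvGet dp k.toNat
        | none => tot
      else tot) 1) = 1 := by
  have hgen : ∀ (l : List Nat), (∀ j ∈ l, j < s.length) → ∀ t0 : Int,
      (l.foldl (fun tot j =>
        if PySem.Int.mod (pvGet s i) (pvGet s j) = 0 then
          match PySem.Dict.get? (pvBuildIdx s) (PySem.Int.floordiv (pvGet s i) (pvGet s j)) with
          | some k => tot + pvGet dp j * pvGet dp k.toNat
          | none => tot
        else tot) t0) = t0 := by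
    intro l
    induction l with
    | nil => intro _ t0; rfl
    | cons j l ihl =>
      intro hmem t0
      rw [List.foldl_cons]
      have hjn : j < s.length := hmem j List.mem_cons_self
      have hstep : (if PySem.Int.mod (pvGet s i) (pvGet s j) = 0 then
          match PySem.Dict.get? (pvBuildIdx s) (PySem.Int.floordiv (pvGet s i) (pvGet s j)) with
          | some k => t0 + pvGet dp j * pvGet dp k.toNat
          | none => t0
        else t0) = t0 := by
        by_cases hc : PySem.Int.mod (pvGet s i) (pvGet s j) = 0
        · rw [if_pos hc]
          cases hix : PySem.Dict.get? (pvBuildIdx s) (PySem.Int.floordiv (pvGet s i) (pvGet s j)) with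
          | none => rfl
          | some k =>
            exfalso
            have hqmem : PySem.Int.floordiv (pvGet s i) (pvGet s j) ∈ s := by
              rcases get?_pvBuildIdx_mem _ k s 0 PySem.Dict.empty hix with hv | hd
              · exact hv
              · simp [PySem.Dict.get?, PySem.Dict.empty] at hd
            have hprod : PySem.Int.floordiv (pvGet s i) (pvGet s j) * pvGet s j = pvGet s i := by
              have := PySem.Int.floordiv_mul_add_mod (pvGet s i) (pvGet s j)
              omega
            exact hnr _ hqmem _ (pvGet_mem s j hjn) (hprod.symm ▸ pvGet_mem s i hin)
        · rw [if_neg hc]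
      rw [hstep, ihl (fun x hx => hmem x (List.mem_cons_of_mem j hx)) t0]
  exact hgen (List.range i) (fun j hj => by have := List.mem_range.mp hj; omega) 1

theorem pvMod_one : PySem.Int.mod 1 pvM = 1 := by
  rw [PySem.Int.mod_eq_emod_of_pos pvM_pos]
  exact Int.emod_eq_of_lt (by norm_num) (by norm_num [pvM])

theorem foldB_norel (s : List Int) (hnr : ∀ x ∈ s, ∀ y ∈ s, x * y ∉ s) :
    ∀ k, k ≤ s.length → ∀ j, j < s.length →
      pvGet ((List.range k).foldl (fun dp i => pvBStep s (pvBuildIdx s) dp i)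
        (List.replicate s.length (0 : Int))) j
      = if j < k then 1 else 0 := by
  intro k
  induction k with
  | zero =>
    intro _ j hj
    simp only [List.range_zero, List.foldl_nil]
    rw [pvGet_replicate, if_pos hj, if_neg (by omega)]
  | succ k ih =>
    intro hk j hj
    have hkn : k < s.length := by omega
    rw [List.range_succ, List.foldl_append, List.foldl_cons, List.foldl_nil]
    set dpk := (List.range k).foldl (fun dp i => pvBStep s (pvBuildIdx s) dp i)
      (List.replicate s.length (0 : Int)) with hdpk
    have hlen : dpk.length = s.length := by
      rw [hdpk, foldB_length]; simp
    simp only [pvBStep]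
    rw [pvBStep_norel s dpk hnr k hkn, pvMod_one, pvGet_set dpk k (by omega) _ j]
    by_cases hjk : j = k
    · subst hjk
      rw [if_pos rfl, if_pos (by omega)]
    · rw [if_neg hjk, ih (by omega) j hj]
      by_cases hle : j < k
      · rw [if_pos hle, if_pos (by omega)]
      · rw [if_neg hle, if_neg (by omega)]

theorem numFactoredBinaryTrees_eq_alt_norel (arr : List Int)
    (hnrel : ∀ x ∈ arr, ∀ y ∈ arr, x * y ∉ arr) :
    numFactoredBinaryTrees arr = numFactoredBinaryTrees_alt arr := by
  simp only [numFactoredBinaryTrees, numFactoredBinaryTrees_alt]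
  set s := PySem.List.sorted arr (fun x => x) false with hs
  have hperm : s.Perm arr := PySem.List.sorted_perm arr (fun x => x) false
  have hnr : ∀ x ∈ s, ∀ y ∈ s, x * y ∉ s := fun x hx y hy hxy =>
    hnrel x (hperm.mem_iff.mp hx) y (hperm.mem_iff.mp hy) (hperm.mem_iff.mp hxy)
  rw [foldA_norel s hnr (s.length - 1) (by omega)]
  congr 1
  apply congrArg
  apply List.ext_getElem
  · rw [foldB_length]; simp
  · intro j h1 h2
    have hjn : j < s.length := by rw [foldB_length] at h2; simpa using h2
    have hv := foldB_norel s hnr s.length (le_refl _) j hjn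
    rw [if_pos hjn] at hv
    rw [← pvGet_eq_getElem _ _ h1, ← pvGet_eq_getElem _ _ h2, hv, pvGet_replicate, if_pos hjn]
-- ===== VERDICT (by name: the statement is the Claim_ definition above) =====
theorem numFactoredBinaryTrees_spec : Claim_equal_numFactoredBinaryTrees := by
  intro arr _ hpre
  unfold Spec_numFactoredBinaryTrees
  rcases hpre with ⟨h1, h2⟩ | hnr
  · exact numFactoredBinaryTrees_eq_alt arr h1 h2
  · push Not at hnr
    exact numFactoredBinaryTrees_eq_alt_norel arr hnr
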